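-- pv_equiv track=rewrite | github.com/Elheims/cypher | cypher.py | otp_encrypt
-- ===== SOURCE A (Python) =====
-- def otp_encrypt(plaintext: str, key: str) -> tuple[str, str]:
--     """
--     Encrypt plaintext using One Time Pads.
--     Only alphabet characters are encrypted; others are kept as-is.
--     Key must be at least as long as the number of alpha characters.
--     Returns (ciphertext, key_used).
--     """
--     # Filter only alpha chars to count key length needed
--     alpha_only = [c for c in plaintext.upper() if c.isalpha()]
--
--     if len(key) < len(alpha_only):
--         raise ValueError(f"Kunci terlalu pendek! Butuh minimal {len(alpha_only)} karakter.")
--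
--     result = []
--     key_idx = 0
--     for char in plaintext.upper():
--         if char.isalpha():
--             p = ord(char) - ord('A')
--             k = ord(key[key_idx]) - ord('A')
--             c = chr((p + k) % 26 + ord('A'))
--             result.append(c)
--             key_idx += 1
--         else:
--             result.append(char)
--
--     return ''.join(result), key
-- ===== SOURCE B (Python) =====
-- def otp_encrypt(plaintext: str, key: str) -> tuple[str, str]:
--     """Encrypt-then-merge: shift all alpha chars against the key in one zip,
--     then weave the encrypted stream back between the non-alpha chars."""
--     up = plaintext.upper()
--     alpha_list = [c for c in up if c.isalpha()]
--     if len(key) < len(alpha_list):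
--         raise ValueError(f"Kunci terlalu pendek! Butuh minimal {len(alpha_list)} karakter.")
--     enc = [chr((ord(c) - 65 + ord(k) - 65) % 26 + 65) for c, k in zip(alpha_list, key)]
--     it = iter(enc)
--     out = [next(it) if ch.isalpha() else ch for ch in up]
--     return ''.join(out), key
-- ===== Notes on version B (the rewrite author's own statement) =====
-- stated objective: alternative
-- what changed: A advances a key index inside one interleaved loop over the text; B first encrypts the whole filtered alpha stream with a single zip comprehension and then weaves it back between the non-alpha characters in a separate merge pass.
import Mathlib
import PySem

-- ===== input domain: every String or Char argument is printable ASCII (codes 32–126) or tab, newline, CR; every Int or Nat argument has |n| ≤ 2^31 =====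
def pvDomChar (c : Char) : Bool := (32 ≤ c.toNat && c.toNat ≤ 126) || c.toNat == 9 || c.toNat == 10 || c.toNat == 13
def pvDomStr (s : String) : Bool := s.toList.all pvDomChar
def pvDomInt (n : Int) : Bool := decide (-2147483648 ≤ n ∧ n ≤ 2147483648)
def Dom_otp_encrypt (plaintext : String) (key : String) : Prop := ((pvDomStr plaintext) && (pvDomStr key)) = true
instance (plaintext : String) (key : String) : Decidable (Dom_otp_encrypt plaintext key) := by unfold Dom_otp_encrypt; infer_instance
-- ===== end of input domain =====

-- B restructures A's single interleaved key-index loop into encrypt-all-alphas-by-zip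
-- followed by a separate merge pass (objective: alternative decomposition, same cost).

-- shared by both ports: chr((ord(c)-65 + ord(k)-65) % 26 + 65), Python floor-mod
def pvShift (c k : Char) : Char :=
  Char.ofNat ((PySem.Int.mod (((c.toNat : Int) - 65) + ((k.toNat : Int) - 65)) 26) + 65).toNat

-- ===== PORT A =====
-- the for-loop: builds result in order, advancing key_idx only on alpha chars
def otpA_loop (key : List Char) : List Char → Nat → List Char
  | [], _ => []
  | c :: rest, i =>
    if PySem.Chars.isalpha c then
      pvShift c (key.getD i ' ') :: otpA_loop key rest (i + 1)
    else
      c :: otpA_loop key rest i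

def otp_encrypt (plaintext : String) (key : String) : String × String :=
  let up := (PySem.Str.upper plaintext).toList
  let alpha_only := up.filter PySem.Chars.isalpha
  if key.length < alpha_only.length then
    ("", key)  -- Python raises ValueError here; excluded by Pre_otp_encrypt
  else
    (String.mk (otpA_loop key.toList up 0), key)

-- ===== PORT B =====
-- merge pass: pull the next encrypted char for alpha positions, copy others
def pvMerge : List Char → List Char → List Char
  | [], _ => []
  | c :: rest, enc =>
    if PySem.Chars.isalpha c then
      match enc with
      | e :: es => e :: pvMerge rest es
      | [] => c :: pvMerge rest []  -- unreachable under the length check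
    else
      c :: pvMerge rest enc

def otp_encrypt_alt (plaintext : String) (key : String) : String × String :=
  let up := (PySem.Str.upper plaintext).toList
  let alpha_list := up.filter PySem.Chars.isalpha
  if key.length < alpha_list.length then
    ("", key)  -- Python raises ValueError here; excluded by Pre_otp_encrypt
  else
    let enc := (alpha_list.zip key.toList).map (fun p => pvShift p.1 p.2)
    (String.mk (pvMerge up enc), key)

-- ===== PRECONDITION & SPEC =====
-- Pre_ excludes exactly the inputs on which A raises ValueError: key shorter than the alpha count.
def Pre_otp_encrypt (plaintext : String) (key : String) : Prop :=
  ((PySem.Str.upper plaintext).toList.filter PySem.Chars.isalpha).length ≤ key.length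
instance (plaintext : String) (key : String) : Decidable (Pre_otp_encrypt plaintext key) := by
  unfold Pre_otp_encrypt; infer_instance

def pvWitness_otp_encrypt : String × String := ("Hi, there!", "abXYZZY")

def Spec_otp_encrypt (plaintext : String) (key : String) (out : String × String) : Prop := out = otp_encrypt_alt plaintext key
instance (plaintext : String) (key : String) (out : String × String) : Decidable (Spec_otp_encrypt plaintext key out) := by unfold Spec_otp_encrypt; infer_instance

-- ===== CLAIM (what is proved, stated in full; the proofs are below) =====
def Claim_equal_otp_encrypt : Prop := ∀ (plaintext : String) (key : String), Dom_otp_encrypt plaintext key → Pre_otp_encrypt plaintext key → Spec_otp_encrypt plaintext key (otp_encrypt plaintext key)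

-- ===== LEMMAS AND PROOFS =====

theorem otp_loop_eq_merge (key : List Char) :
    ∀ (chars : List Char) (i : Nat),
      i + (chars.filter PySem.Chars.isalpha).length ≤ key.length →
      otpA_loop key chars i =
        pvMerge chars (((chars.filter PySem.Chars.isalpha).zip (key.drop i)).map
          (fun p => pvShift p.1 p.2)) := by
  intro chars
  induction chars with
  | nil => intro i _; simp [otpA_loop, pvMerge]
  | cons c rest ih =>
    intro i h
    by_cases hc : PySem.Chars.isalpha c = true
    · have hfl : ((c :: rest).filter PySem.Chars.isalpha) = c :: rest.filter PySem.Chars.isalpha := by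
        simp [List.filter_cons, hc]
      rw [hfl] at h
      have hi : i < key.length := by simp at h; omega
      have hdrop : key.drop i = key[i] :: key.drop (i + 1) :=
        List.drop_eq_getElem_cons hi
      have hgd : key.getD i ' ' = key[i] := List.getD_eq_getElem _ _ hi
      simp only [otpA_loop, pvMerge, hc, if_pos, hfl, hdrop, List.zip_cons_cons, List.map_cons]
      rw [hgd, ih (i + 1) (by simp at h ⊢; omega)]
    · have hfl : ((c :: rest).filter PySem.Chars.isalpha) = rest.filter PySem.Chars.isalpha := by
        simp [List.filter_cons, hc]
      rw [hfl] at h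
      simp only [otpA_loop, pvMerge, hc, hfl, Bool.false_eq_true, if_false]
      rw [ih i h]

-- ===== VERDICT (by name: the statement is the Claim_ definition above) =====
theorem otp_encrypt_spec : Claim_equal_otp_encrypt := by
  intro plaintext key _ hpre
  unfold Spec_otp_encrypt otp_encrypt otp_encrypt_alt
  simp only []
  have hklen : key.length = key.toList.length := by simp
  unfold Pre_otp_encrypt at hpre
  rw [if_neg (by omega), if_neg (by omega)]
  have := otp_loop_eq_merge key.toList ((PySem.Str.upper plaintext).toList) 0
    (by simpa using hpre)
  simp only [List.drop_zero] at this
  rw [this]
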